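-- pv_equiv track=rewrite | github.com/ozkayas/leetcode_solutions | 9999-A2Z-OA/Scripts/find_left_min_greater.py | find_left_min_greater
-- ===== SOURCE A (Python) =====
-- import bisect
--
-- def find_left_min_greater(arr):
--     result = [-1] * len(arr)  # Sonuçları tutacak liste
--     sorted_list = []  # Soldaki elemanları sıralı tutmak için boş liste
--
--     for i in range(len(arr)):
--         # arr[i]'den büyük olan ilk elemanı bulmak için binary search yapalım
--         pos = bisect.bisect_right(sorted_list, arr[i])
--
--         # Eğer pos sıfır değilse, kendisinden büyük en küçük elemanı bulduk
--         if pos < len(sorted_list):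
--             result[i] = sorted_list[pos]
--
--         # Şu anki elemanı sıralı bir şekilde listeye ekleyelim
--         bisect.insort(sorted_list, arr[i])
--
--     return result
-- ===== SOURCE B (Python) =====
-- def find_left_min_greater(arr):
--     out = []
--     prefix = []
--     for x in arr:
--         cands = [y for y in prefix if y > x]
--         out.append(min(cands) if cands else -1)
--         prefix.append(x)
--     return out
-- ===== Notes on version B (the rewrite author's own statement) =====
-- stated objective: simpler
-- what changed: Replaces the maintained sorted list with bisect binary search and insort by a plain scan of the seen prefix: filter the earlier elements greater than x and take their min (or -1).
import Mathlib
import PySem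

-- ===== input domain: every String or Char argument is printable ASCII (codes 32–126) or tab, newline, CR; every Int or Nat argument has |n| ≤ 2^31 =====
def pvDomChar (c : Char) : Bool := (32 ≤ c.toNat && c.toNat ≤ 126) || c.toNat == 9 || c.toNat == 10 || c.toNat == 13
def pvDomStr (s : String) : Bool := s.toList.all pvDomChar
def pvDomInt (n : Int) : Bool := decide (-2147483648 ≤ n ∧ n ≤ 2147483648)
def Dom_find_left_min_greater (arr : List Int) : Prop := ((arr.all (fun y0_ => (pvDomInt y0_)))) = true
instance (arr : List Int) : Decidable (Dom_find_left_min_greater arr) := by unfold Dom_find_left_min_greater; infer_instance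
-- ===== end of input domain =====

-- B replaces A's maintained sorted list with bisect/insort by a plain scan of the seen
-- prefix (filter the earlier elements greater than x, take their min, else -1): simpler.

-- ===== PORT A =====
-- bisect.bisect_right on the sorted list: insertion point after all elements ≤ x (exact on sorted lists)
def pvBisectRight (s : List Int) (x : Int) : Nat := (s.takeWhile (fun y => y ≤ x)).length
-- bisect.insort on the sorted list: insert x after all elements ≤ x (exact on sorted lists)
def pvInsort (s : List Int) (x : Int) : List Int :=
  s.takeWhile (fun y => y ≤ x) ++ x :: s.dropWhile (fun y => y ≤ x)

def pvStepA (st : List Int × List Int) (x : Int) : List Int × List Int :=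
  let pos := pvBisectRight st.1 x
  let r : Int := if pos < st.1.length then st.1.getD pos 0 else -1
  (pvInsort st.1 x, st.2 ++ [r])

def find_left_min_greater (arr : List Int) : List Int :=
  (arr.foldl pvStepA ([], [])).2

-- ===== PORT B =====
def pvStepB (st : List Int × List Int) (x : Int) : List Int × List Int :=
  let cands := st.1.filter (fun y => y > x)
  let r : Int := match PySem.List.min? cands (fun y => y) with
    | some m => m
    | none => -1
  (st.1 ++ [x], st.2 ++ [r])

def find_left_min_greater_alt (arr : List Int) : List Int :=
  (arr.foldl pvStepB ([], [])).2

-- ===== PRECONDITION & SPEC =====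
def Spec_find_left_min_greater (arr : List Int) (out : List Int) : Prop := out = find_left_min_greater_alt arr
instance (arr : List Int) (out : List Int) : Decidable (Spec_find_left_min_greater arr out) := by unfold Spec_find_left_min_greater; infer_instance

-- ===== CLAIM (what is proved, stated in full; the proofs are below) =====
def Claim_equal_find_left_min_greater : Prop := ∀ (arr : List Int), Dom_find_left_min_greater arr → Spec_find_left_min_greater arr (find_left_min_greater arr)

-- ===== LEMMAS AND PROOFS =====

-- B's per-element value: min of the earlier elements greater than x, or -1
def pvG (p : List Int) (x : Int) : Int :=
  match PySem.List.min? (p.filter (fun y => y > x)) (fun y => y) with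
  | some m => m
  | none => -1

-- the common specification: outputs for `rest` after prefix `p`
def pvSpec (p : List Int) : List Int → List Int
  | [] => []
  | x :: rest => pvG p x :: pvSpec (p ++ [x]) rest

theorem pvStepB_eq (p acc : List Int) (x : Int) :
    pvStepB (p, acc) x = (p ++ [x], acc ++ [pvG p x]) := by
  simp [pvStepB, pvG]

theorem pvFoldB (rest : List Int) : ∀ (p acc : List Int),
    (rest.foldl pvStepB (p, acc)).2 = acc ++ pvSpec p rest := by
  induction rest with
  | nil => intro p acc; simp [pvSpec]
  | cons x rest ih =>
    intro p acc
    simp only [List.foldl_cons, pvStepB_eq, pvSpec, ih, List.append_assoc,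
      List.singleton_append]

theorem mem_takeWhile_le {x b : Int} {s : List Int} (h : b ∈ s.takeWhile (fun y => y ≤ x)) :
    b ≤ x := by
  have := List.mem_takeWhile_imp h
  simpa using this

theorem mem_dropWhile_gt {x b : Int} : ∀ {s : List Int}, s.Pairwise (· ≤ ·) →
    b ∈ s.dropWhile (fun y => y ≤ x) → x < b := by
  intro s
  induction s with
  | nil => intro _ h; simp at h
  | cons a t ih =>
    intro hp hm
    by_cases ha : a ≤ x
    · rw [List.dropWhile_cons_of_pos (by simpa using ha)] at hm
      exact ih (List.pairwise_cons.mp hp).2 hm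
    · rw [List.dropWhile_cons_of_neg (by simpa using ha)] at hm
      rcases List.mem_cons.mp hm with h | h
      · omega
      · have := (List.pairwise_cons.mp hp).1 b h
        omega

theorem filter_eq_dropWhile {x : Int} {s : List Int} (hs : s.Pairwise (· ≤ ·)) :
    s.filter (fun y => y > x) = s.dropWhile (fun y => y ≤ x) := by
  conv_lhs => rw [← List.takeWhile_append_dropWhile (p := fun y => decide (y ≤ x)) (l := s)]
  rw [List.filter_append]
  have h1 : (s.takeWhile (fun y => y ≤ x)).filter (fun y => y > x) = [] := by
    rw [List.filter_eq_nil_iff]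
    intro b hb
    have := mem_takeWhile_le hb
    simpa using by omega
  have h2 : (s.dropWhile (fun y => y ≤ x)).filter (fun y => y > x) = s.dropWhile (fun y => y ≤ x) := by
    rw [List.filter_eq_self]
    intro b hb
    have := mem_dropWhile_gt hs hb
    simpa using this
  rw [h1, h2, List.nil_append]

theorem getD_append_len (l1 l2 : List Int) (d : Int) :
    (l1 ++ l2).getD l1.length d = l2.getD 0 d := by
  induction l1 with
  | nil => simp
  | cons a t ih => simpa using ih

-- the step values agree: A's bisect answer on a sorted copy of the prefix = B's filter-min
theorem pvKey {s p : List Int} (x : Int) (hs : s.Pairwise (· ≤ ·)) (hperm : s.Perm p) :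
    (if pvBisectRight s x < s.length then s.getD (pvBisectRight s x) 0 else -1) = pvG p x := by
  have hfil : (p.filter (fun y => y > x)).Perm (s.dropWhile (fun y => y ≤ x)) := by
    rw [← filter_eq_dropWhile hs]
    exact (hperm.filter _).symm
  rcases hD : s.dropWhile (fun y => y ≤ x) with _ | ⟨d, D'⟩
  all_goals rw [hD] at hfil
  · -- no element greater than x
    have hnil : p.filter (fun y => y > x) = [] := hfil.eq_nil
    have hlen : pvBisectRight s x = s.length := by
      unfold pvBisectRight
      conv_rhs => rw [← List.takeWhile_append_dropWhile (p := fun y => decide (y ≤ x)) (l := s)]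
      rw [hD]; simp
    rw [hlen]
    simp [pvG, hnil, PySem.List.min?]
  · -- d is the head of the sorted tail: the least element greater than x
    have hsplit : s = s.takeWhile (fun y => y ≤ x) ++ d :: D' := by
      rw [← hD, List.takeWhile_append_dropWhile]
    have hlt : pvBisectRight s x < s.length := by
      unfold pvBisectRight
      conv_rhs => rw [hsplit]
      simp
    have hget : s.getD (pvBisectRight s x) 0 = d := by
      unfold pvBisectRight
      generalize hT : s.takeWhile (fun y => decide (y ≤ x)) = T at hsplit ⊢
      rw [hsplit, getD_append_len]
      rfl
    rw [if_pos hlt, hget]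
    -- B's side: min of the (nonempty) candidates is d
    have hne : p.filter (fun y => y > x) ≠ [] := by
      intro h; rw [h] at hfil
      exact (List.cons_ne_nil d D') hfil.symm.eq_nil
    rcases hm : PySem.List.min? (p.filter (fun y => y > x)) (fun y => y) with _ | m
    · exact absurd ((PySem.List.min?_eq_none_iff _ _).mp hm) hne
    · have hmem : m ∈ p.filter (fun y => y > x) := PySem.List.min?_mem hm
      have hmin : ∀ y ∈ p.filter (fun y => y > x), m ≤ y := by
        intro y hy; exact PySem.List.min?_isMin hm y hy
      have hd_mem : d ∈ p.filter (fun y => y > x) := hfil.symm.subset (by simp)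
      have h1 : m ≤ d := hmin d hd_mem
      have h2 : d ≤ m := by
        have hmD : m ∈ d :: D' := hfil.subset hmem
        have hpD : (d :: D').Pairwise (· ≤ ·) := by
          have hs' := hs
          rw [hsplit] at hs'
          exact (List.pairwise_append.mp hs').2.1
        rcases List.mem_cons.mp hmD with h | h
        · omega
        · exact (List.pairwise_cons.mp hpD).1 m h
      simp only [pvG, hm]
      omega

theorem insort_perm (s : List Int) (x : Int) : (pvInsort s x).Perm (x :: s) := by
  unfold pvInsort
  have h : (s.takeWhile (fun y => y ≤ x) ++ x :: s.dropWhile (fun y => y ≤ x)).Perm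
      (x :: (s.takeWhile (fun y => y ≤ x) ++ s.dropWhile (fun y => y ≤ x))) := List.perm_middle
  rwa [List.takeWhile_append_dropWhile] at h

theorem insort_sorted {s : List Int} (x : Int) (hs : s.Pairwise (· ≤ ·)) :
    (pvInsort s x).Pairwise (· ≤ ·) := by
  have hsw : (s.takeWhile (fun y => y ≤ x) ++ s.dropWhile (fun y => y ≤ x)).Pairwise (· ≤ ·) := by
    rw [List.takeWhile_append_dropWhile]; exact hs
  have h := List.pairwise_append.mp hsw
  unfold pvInsort
  rw [List.pairwise_append]
  refine ⟨h.1, ?_, ?_⟩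
  · rw [List.pairwise_cons]
    exact ⟨fun b hb => le_of_lt (mem_dropWhile_gt hs hb), h.2.1⟩
  · intro a ha b hb
    rcases List.mem_cons.mp hb with h' | h'
    · subst h'; exact mem_takeWhile_le ha
    · exact h.2.2 a ha b h'

theorem pvFoldA (rest : List Int) : ∀ (s p acc : List Int),
    s.Pairwise (· ≤ ·) → s.Perm p →
    (rest.foldl pvStepA (s, acc)).2 = acc ++ pvSpec p rest := by
  induction rest with
  | nil => intro s p acc _ _; simp [pvSpec]
  | cons x rest ih =>
    intro s p acc hs hperm
    have hstep : pvStepA (s, acc) x = (pvInsort s x, acc ++ [pvG p x]) := by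
      simp only [pvStepA]
      rw [pvKey x hs hperm]
    rw [List.foldl_cons, hstep,
      ih (pvInsort s x) (p ++ [x]) _ (insort_sorted x hs)
        ((insort_perm s x).trans ((hperm.cons x).trans (List.perm_append_singleton x p).symm))]
    simp only [pvSpec, List.append_assoc, List.singleton_append]

-- ===== VERDICT (by name: the statement is the Claim_ definition above) =====
theorem find_left_min_greater_spec : Claim_equal_find_left_min_greater := by
  intro arr _
  unfold Spec_find_left_min_greater find_left_min_greater find_left_min_greater_alt
  rw [pvFoldA arr [] [] [] (by simp) (List.Perm.refl _), pvFoldB arr [] []]
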